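-- pv_equiv track=rewrite | github.com/DevMatrix1/dsa-practice | python/vedant_bhatnagar/PosCumulative.py | getPositiveCumulativeSum
-- ===== SOURCE A (Python) =====
-- from typing import List
--
-- def getPositiveCumulativeSum(arr: List[int]) -> List[int]:
-- 	# add your logic here
-- 	sum,a = 0,[]
-- 	for num in arr:
-- 		num = num + sum
-- 		sum = num
-- 		if(sum > 0):
-- 			a.append(sum)
-- 	return a
-- ===== SOURCE B (Python) =====
-- from typing import List
--
-- def getPositiveCumulativeSum(arr: List[int]) -> List[int]:
--     # Right-to-left pass: prefix sum at i == total - (sum of elements after i).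
--     total = sum(arr)
--     tail = 0
--     out = []
--     for x in reversed(arr):
--         prefix = total - tail
--         if prefix > 0:
--             out.append(prefix)
--         tail += x
--     out.reverse()
--     return out
-- ===== Notes on version B (the rewrite author's own statement) =====
-- stated objective: alternative
-- what changed: Instead of A's left-to-right running-sum loop, B computes the total once and walks the array right-to-left maintaining a suffix sum, recovering each prefix sum as total minus the suffix sum, collecting positives back-to-front and reversing at the end.
import Mathlib
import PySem

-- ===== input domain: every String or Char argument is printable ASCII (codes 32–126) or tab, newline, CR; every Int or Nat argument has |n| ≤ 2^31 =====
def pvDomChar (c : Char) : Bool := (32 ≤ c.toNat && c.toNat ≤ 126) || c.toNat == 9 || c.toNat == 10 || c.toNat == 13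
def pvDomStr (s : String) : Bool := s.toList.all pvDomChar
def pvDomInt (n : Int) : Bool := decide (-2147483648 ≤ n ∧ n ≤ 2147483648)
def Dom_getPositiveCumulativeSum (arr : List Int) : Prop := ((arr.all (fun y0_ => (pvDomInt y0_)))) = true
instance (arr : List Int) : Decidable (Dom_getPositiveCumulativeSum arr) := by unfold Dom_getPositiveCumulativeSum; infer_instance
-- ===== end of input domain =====

-- B replaces A's left-to-right running-sum loop by a right-to-left pass: pfx sum = total - suffix sum; return value only, same cost.

-- ===== PORT A =====
-- fused loop: running sum and output list carried together, appending when positive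
def getPositiveCumulativeSum (arr : List Int) : List Int :=
  (arr.foldl (fun (st : Int × List Int) num =>
    let num' := num + st.1
    let sum := num'
    if sum > 0 then (sum, st.2 ++ [sum]) else (sum, st.2)) (0, [])).2

-- ===== PORT B =====
-- total = sum(arr); iterate reversed(arr) with suffix sum 'tail'; pfx = total - tail; reverse output at the end
def getPositiveCumulativeSum_alt (arr : List Int) : List Int :=
  let total := arr.sum
  let st := arr.reverse.foldl (fun (st : Int × List Int) x =>
      let pfx := total - st.1
      (st.1 + x, if pfx > 0 then st.2 ++ [pfx] else st.2)) (0, [])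
  st.2.reverse

-- ===== PRECONDITION & SPEC =====
def Spec_getPositiveCumulativeSum (arr : List Int) (out : List Int) : Prop := out = getPositiveCumulativeSum_alt arr
instance (arr : List Int) (out : List Int) : Decidable (Spec_getPositiveCumulativeSum arr out) := by unfold Spec_getPositiveCumulativeSum; infer_instance

-- ===== CLAIM =====
def Claim_equal_getPositiveCumulativeSum : Prop := ∀ (arr : List Int), Dom_getPositiveCumulativeSum arr → Spec_getPositiveCumulativeSum arr (getPositiveCumulativeSum arr)

-- ===== LEMMAS AND PROOFS =====
-- proof-only characterisation: the list of pfx sums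
def pvAccumulate (s : Int) : List Int → List Int
  | [] => []
  | x :: xs => (s + x) :: pvAccumulate (s + x) xs

theorem foldl_eq_acc_filter (l : List Int) (s : Int) (a : List Int) :
    (l.foldl (fun (st : Int × List Int) num =>
      let num' := num + st.1
      let sum := num'
      if sum > 0 then (sum, st.2 ++ [sum]) else (sum, st.2)) (s, a)).2
    = a ++ (pvAccumulate s l).filter (fun s => s > 0) := by
  induction l generalizing s a with
  | nil => simp [pvAccumulate]
  | cons x xs ih =>
    simp only [List.foldl_cons, pvAccumulate, List.filter_cons]
    by_cases h : x + s > 0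
    · have hs : s + x > 0 := by omega
      simp [hs, ih, show x + s = s + x by ring]
    · have hs : ¬ s + x > 0 := by omega
      simp [hs, ih, show x + s = s + x by ring]

theorem foldr_eq_rev_filter (total : Int) (l : List Int) :
    l.foldr (fun x (st : Int × List Int) =>
      let pfx := total - st.1
      (st.1 + x, if pfx > 0 then st.2 ++ [pfx] else st.2)) (0, [])
    = (l.sum, ((pvAccumulate (total - l.sum) l).filter (fun s => s > 0)).reverse) := by
  induction l with
  | nil => simp [pvAccumulate]
  | cons x xs ih =>
    rw [List.foldr_cons, ih]
    have harith : total - (x + xs.sum) + x = total - xs.sum := by ring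
    by_cases h : total - xs.sum > 0
    · have h' : xs.sum < total := by omega
      simp [pvAccumulate, List.filter_cons, harith, h, h', add_comm]
    · have h' : ¬ xs.sum < total := by omega
      simp [pvAccumulate, List.filter_cons, harith, h, h', add_comm]

-- ===== VERDICT =====
theorem getPositiveCumulativeSum_spec : Claim_equal_getPositiveCumulativeSum := by
  intro arr _
  unfold Spec_getPositiveCumulativeSum getPositiveCumulativeSum getPositiveCumulativeSum_alt
  simp only [List.foldl_reverse]
  rw [show (fun (x : Int) (st : Int × List Int) =>
        (fun (st : Int × List Int) (x : Int) =>
          let pfx := arr.sum - st.1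
          (st.1 + x, if pfx > 0 then st.2 ++ [pfx] else st.2)) st x)
      = (fun (x : Int) (st : Int × List Int) =>
          let pfx := arr.sum - st.1
          (st.1 + x, if pfx > 0 then st.2 ++ [pfx] else st.2)) from rfl,
    foldr_eq_rev_filter arr.sum arr]
  simp only [sub_self, List.reverse_reverse]
  simpa using foldl_eq_acc_filter arr 0 []
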